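-- pv_equiv track=rewrite | github.com/327000/algo | namil/temp.py | solution
-- ===== SOURCE A (Python) =====
-- def solution(n, t, m, p):
--     game = ''
--     numb_now = 0
--
--     while len(game) <= t * m:
--         game += numbify(n, numb_now)
--         numb_now += 1
--     answer = game[p-1::m]
--     return answer[:t]
--
-- def numbify(n:int, x:int):
--     answer = ''
--     temp = x
--     if temp < n:
--         return moreThanTen(temp)
--     while temp >= n:
--         answer = moreThanTen(temp % n) + answer
--         temp = temp // n
--         if not temp >= n:
--             answer = moreThanTen(temp) + answer
--         else:
--             continue
--     return answer
--
-- def moreThanTen(x:int):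
--     if x == 10:
--         return 'A'
--     elif x == 11:
--         return 'B'
--     elif x == 12:
--         return 'C'
--     elif x == 13:
--         return 'D'
--     elif x == 14:
--         return 'E'
--     elif x == 15:
--         return 'F'
--     else:
--         return str(x)
-- ===== SOURCE B (Python) =====
-- def solution(n, t, m, p):
--     # Stream the base-n representations, picking only the needed characters,
--     # instead of materializing the whole game string and slicing it.
--     limit = t * m
--     out = []
--     need = p - 1          # next absolute position to pick (0-based)
--     pos = 0               # characters emitted so far
--     x = 0
--     while pos <= limit:
--         r = rep(n, x)
--         end = pos + len(r)
--         while need < end and len(out) < t: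
--             out.append(r[need - pos])
--             need += m
--         pos = end
--         x += 1
--     return ''.join(out)
--
-- _DIGITS = '0123456789ABCDEF'
--
-- def rep(n, x):
--     # base-n representation, digits 10..15 as A-F, larger digits in decimal
--     if x < n:
--         return _DIGITS[x] if x < 16 else str(x)
--     ds = []
--     while x >= n:
--         d = x % n
--         ds.append(_DIGITS[d] if d < 16 else str(d))
--         x //= n
--     ds.append(_DIGITS[x] if x < 16 else str(x))
--     return ''.join(reversed(ds))
-- ===== Notes on version B (the rewrite author's own statement) =====
-- stated objective: faster
-- what changed: B streams the base-n number representations once, tracking the next needed position arithmetically and collecting only the requested characters, instead of A's building the whole game string by repeated concatenation (with per-digit string prepending inside numbify) and then slicing it.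
-- outside the precondition, e.g. on solution(2, 3, 1, 0): A returns '0', B returns '001'; on solution(5, 1, 2, -3): A returns '0', B raises IndexError; on solution(7, -1, -3, 20): A returns '3', B returns ''
import Mathlib
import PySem

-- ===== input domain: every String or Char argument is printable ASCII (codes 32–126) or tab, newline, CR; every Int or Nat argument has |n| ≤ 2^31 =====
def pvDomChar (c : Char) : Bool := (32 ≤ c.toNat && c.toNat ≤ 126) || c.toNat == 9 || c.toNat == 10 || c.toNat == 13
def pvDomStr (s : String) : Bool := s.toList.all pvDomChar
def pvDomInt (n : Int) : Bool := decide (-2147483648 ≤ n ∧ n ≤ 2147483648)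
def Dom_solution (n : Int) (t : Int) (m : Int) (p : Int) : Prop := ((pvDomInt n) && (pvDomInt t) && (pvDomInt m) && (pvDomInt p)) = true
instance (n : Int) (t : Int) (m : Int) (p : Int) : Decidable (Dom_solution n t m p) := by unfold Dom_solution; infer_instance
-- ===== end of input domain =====

-- B streams the base-n representations and picks only the needed characters instead of
-- materializing the whole game string and slicing it (measurably faster, same results).

-- ===== PORT A =====
def mtt (x : Int) : List Char :=
  if x = 10 then ['A']
  else if x = 11 then ['B']
  else if x = 12 then ['C']
  else if x = 13 then ['D']
  else if x = 14 then ['E']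
  else if x = 15 then ['F']
  else PySem.Int.toChars x

def numbifyLoop (n : Int) : Nat → Int → List Char → List Char
  | 0, _, answer => answer
  | fuel + 1, temp, answer =>
    if n ≤ temp then
      let answer1 := mtt (PySem.Int.mod temp n) ++ answer
      let temp1 := PySem.Int.floordiv temp n
      let answer2 := if ¬ n ≤ temp1 then mtt temp1 ++ answer1 else answer1
      numbifyLoop n fuel temp1 answer2
    else answer

def numbifyA (n x : Int) : List Char :=
  if x < n then mtt x
  else numbifyLoop n (x.natAbs + 1) x []

def gameLoop (n t m : Int) : Nat → List Char → Int → List Char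
  | 0, game, _ => game
  | fuel + 1, game, numbNow =>
    if (game.length : Int) ≤ t * m then
      gameLoop n t m fuel (game ++ numbifyA n numbNow) (numbNow + 1)
    else game

def solution (n : Int) (t : Int) (m : Int) (p : Int) : String :=
  let game := gameLoop n t m ((t * m).toNat + 2) [] 0
  let answer := (PySem.List.slice? game (some (p - 1)) none m).getD []
  String.ofList (PySem.List.slice answer none (some t))

-- ===== PORT B =====
def hexDigits : List Char := "0123456789ABCDEF".toList

def digitChar (d : Int) : List Char :=
  if d < 16 then ((PySem.List.pyGet? hexDigits d).map (fun c => [c])).getD []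
  else PySem.Int.toChars d

def repLoop (n : Int) : Nat → Int → List (List Char) → Int × List (List Char)
  | 0, x, ds => (x, ds)
  | fuel + 1, x, ds =>
    if n ≤ x then repLoop n fuel (PySem.Int.floordiv x n) (ds ++ [digitChar (PySem.Int.mod x n)])
    else (x, ds)

def repB (n x : Int) : List Char :=
  if x < n then digitChar x
  else
    let (lead, ds) := repLoop n (x.natAbs + 1) x []
    ((ds ++ [digitChar lead]).reverse).flatten

def altInner (m t : Int) : Nat → Int → Int → Int → List Char → List Char → List Char × Int
  | 0, need, _, _, _, out => (out, need)
  | fuel + 1, need, endPos, pos, r, out =>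
    if need < endPos ∧ (out.length : Int) < t then
      let out1 := match PySem.List.pyGet? r (need - pos) with
        | some c => out ++ [c]
        | none => out
      altInner m t fuel (need + m) endPos pos r out1
    else (out, need)

def altOuter (n t m : Int) : Nat → List Char → Int → Int → Int → List Char
  | 0, out, _, _, _ => out
  | fuel + 1, out, need, pos, x =>
    if pos ≤ t * m then
      let r := repB n x
      let endPos := pos + (r.length : Int)
      let st := altInner m t (r.length + t.toNat + 1) need endPos pos r out
      altOuter n t m fuel st.1 st.2 endPos (x + 1)
    else out

def solution_alt (n : Int) (t : Int) (m : Int) (p : Int) : String :=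
  String.ofList (altOuter n t m ((t * m).toNat + 2) [] (p - 1) 0 0)

-- ===== PRECONDITION & SPEC =====
-- Unless the build loop never runs (t*m < 0, where A returns '' for any n, m, p), Pre_ excludes
-- n ≤ 1 (A loops forever or divides by zero), m ≤ 0 (m = 0 raises ValueError; m < 0 reverse-slices
-- the accidentally sized buffer, a defensible-corner artefact) and p ≤ 0 (Python's negative-index
-- wraparound on the buffer, where B's forward scan raises).
def Pre_solution (n : Int) (t : Int) (m : Int) (p : Int) : Prop := (2 ≤ n ∧ 1 ≤ m ∧ 1 ≤ p) ∨ t * m < 0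
instance (n : Int) (t : Int) (m : Int) (p : Int) : Decidable (Pre_solution n t m p) := by unfold Pre_solution; infer_instance

def pvWitness_solution : Int × Int × Int × Int := (2, 5, 2, 1)

def Spec_solution (n : Int) (t : Int) (m : Int) (p : Int) (out : String) : Prop := out = solution_alt n t m p
instance (n : Int) (t : Int) (m : Int) (p : Int) (out : String) : Decidable (Spec_solution n t m p out) := by unfold Spec_solution; infer_instance

-- ===== CLAIM (what is proved, stated in full; the proofs are below) =====
def Claim_equal_solution : Prop := ∀ (n : Int) (t : Int) (m : Int) (p : Int), Dom_solution n t m p → Pre_solution n t m p → Spec_solution n t m p (solution n t m p)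

-- ===== LEMMAS AND PROOFS =====

def pk (s : Nat) (cs : List Char) (q : Nat) : List Char :=
  if h : q < cs.length then cs[q] :: pk s cs (q + s + 1) else []
termination_by cs.length - q
decreasing_by omega

def lowDigs (nn x : Nat) : List Nat :=
  if h : 2 ≤ nn ∧ nn ≤ x then x % nn :: lowDigs nn (x / nn) else []
termination_by x
decreasing_by exact Nat.div_lt_self (by omega) (by omega)

def leadDig (nn x : Nat) : Nat :=
  if h : 2 ≤ nn ∧ nn ≤ x then leadDig nn (x / nn) else x
termination_by x
decreasing_by exact Nat.div_lt_self (by omega) (by omega)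

def mttN (d : Nat) : List Char := mtt (d : Int)
def digN (d : Nat) : List Char := digitChar (d : Int)

lemma mtt_eq_digit (d : Nat) : mttN d = digN d := by
  unfold mttN digN
  by_cases h : d < 16
  · interval_cases d <;> decide
  · simp only [mtt, digitChar]
    rw [if_neg (by omega), if_neg (by omega), if_neg (by omega), if_neg (by omega),
        if_neg (by omega), if_neg (by omega), if_neg (by omega)]

lemma mttN_eq_digN : mttN = digN := funext mtt_eq_digit

lemma numbifyLoop_stop (n : Int) (f : Nat) (temp : Int) (ans : List Char) (h : ¬ n ≤ temp) :
    numbifyLoop n f temp ans = ans := by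
  cases f <;> simp [numbifyLoop, h]

lemma numbifyLoop_spec (nn : Nat) (hn : 2 ≤ nn) :
    ∀ f x (acc : List Char), nn ≤ x → x < f →
      numbifyLoop (nn : Int) f (x : Int) acc =
        (((lowDigs nn x ++ [leadDig nn x]).map mttN).reverse).flatten ++ acc := by
  intro f x
  induction x using Nat.strong_induction_on generalizing f with
  | _ x ih =>
    intro acc hx hf
    obtain ⟨f, rfl⟩ : ∃ f', f = f' + 1 := ⟨f - 1, by omega⟩
    rw [numbifyLoop, if_pos (by exact_mod_cast hx)]
    simp only [PySem.Int.mod_natCast, PySem.Int.floordiv_natCast]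
    rw [lowDigs, dif_pos ⟨hn, hx⟩, leadDig, dif_pos ⟨hn, hx⟩]
    by_cases h1 : nn ≤ x / nn
    · rw [if_neg (not_not_intro (by exact_mod_cast h1))]
      rw [show mtt ((x % nn : Nat) : Int) = mttN (x % nn) from rfl]
      rw [ih (x / nn) (Nat.div_lt_self (by omega) (by omega)) f
        (mttN (x % nn) ++ acc) h1
        (by have := Nat.div_lt_self (show 0 < x by omega) (show 1 < nn by omega); omega)]
      simp [mttN]
    · rw [if_pos (show ¬ ((nn : Int) ≤ ((x / nn : Nat) : Int)) by exact_mod_cast h1)]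
      rw [numbifyLoop_stop _ _ _ _ (show ¬ ((nn : Int) ≤ ((x / nn : Nat) : Int)) by exact_mod_cast h1)]
      rw [lowDigs, dif_neg (by omega), leadDig, dif_neg (by omega)]
      simp [mttN]

lemma repLoop_spec (nn : Nat) (hn : 2 ≤ nn) :
    ∀ f x (ds : List (List Char)), x < f →
      repLoop (nn : Int) f (x : Int) ds =
        ((leadDig nn x : Int), ds ++ (lowDigs nn x).map digN) := by
  intro f x
  induction x using Nat.strong_induction_on generalizing f with
  | _ x ih =>
    intro ds hf
    obtain ⟨f, rfl⟩ : ∃ f', f = f' + 1 := ⟨f - 1, by omega⟩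
    rw [repLoop]
    by_cases hx : nn ≤ x
    · have hl : lowDigs nn x = x % nn :: lowDigs nn (x / nn) := by rw [lowDigs, dif_pos ⟨hn, hx⟩]
      have hd : leadDig nn x = leadDig nn (x / nn) := by rw [leadDig, dif_pos ⟨hn, hx⟩]
      rw [if_pos (by exact_mod_cast hx)]
      simp only [PySem.Int.mod_natCast, PySem.Int.floordiv_natCast]
      rw [ih (x / nn) (Nat.div_lt_self (by omega) (by omega)) f _
        (by have := Nat.div_lt_self (show 0 < x by omega) (show 1 < nn by omega); omega)]
      rw [hl, hd]
      simp [digN]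
    · rw [if_neg (by exact_mod_cast hx)]
      rw [lowDigs, dif_neg (by omega), leadDig, dif_neg (by omega)]
      simp

lemma blk_eq (nn : Nat) (hn : 2 ≤ nn) (x : Nat) :
    numbifyA (nn : Int) (x : Int) = repB (nn : Int) (x : Int) := by
  unfold numbifyA repB
  by_cases hx : x < nn
  · rw [if_pos (by exact_mod_cast hx), if_pos (by exact_mod_cast hx)]
    exact mtt_eq_digit x
  · rw [if_neg (by exact_mod_cast hx), if_neg (by exact_mod_cast hx)]
    have hxa : ((x : Int).natAbs + 1) = x + 1 := by simp
    rw [hxa, numbifyLoop_spec nn hn (x + 1) x [] (by omega) (by omega),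
        repLoop_spec nn hn (x + 1) x [] (by omega)]
    rw [List.map_append, mttN_eq_digN]
    have : ((leadDig nn x : Nat) : Int) = (leadDig nn x : Int) := rfl
    simp [digN]

lemma pk_stop (s : Nat) (cs : List Char) (q : Nat) (h : cs.length ≤ q) : pk s cs q = [] := by
  rw [pk, dif_neg (by omega)]

lemma pk_next (s : Nat) (cs : List Char) : ∀ q, cs.length ≤ q + (s + 1) * (pk s cs q).length := by
  intro q
  induction hq : cs.length - q using Nat.strong_induction_on generalizing q with
  | _ d ih =>
    by_cases h : q < cs.length
    · rw [pk, dif_pos h]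
      have h2 := ih (cs.length - (q + s + 1)) (by omega) (q + s + 1) rfl
      have h3 : (s + 1) * ((pk s cs (q + s + 1)).length + 1)
          = (s + 1) * (pk s cs (q + s + 1)).length + (s + 1) := by ring
      simp only [List.length_cons]
      omega
    · rw [pk_stop s cs q (by omega)]; simp; omega

lemma pk_append_ge (s : Nat) (g r : List Char) : ∀ q, g.length ≤ q →
    pk s (g ++ r) q = pk s r (q - g.length) := by
  intro q
  induction hq : r.length + g.length - q using Nat.strong_induction_on generalizing q with
  | _ d ih =>
    intro hge
    by_cases h : q < g.length + r.length
    · rw [pk, dif_pos (by simp only [List.length_append]; omega)]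
      conv_rhs => rw [pk, dif_pos (show q - g.length < r.length by omega)]
      have e1 : (g ++ r)[q]'(by simp only [List.length_append]; omega) = r[q - g.length]'(by omega) := by
        rw [List.getElem_append_right hge]
      have e2 : q + s + 1 - g.length = q - g.length + s + 1 := by omega
      rw [ih (r.length + g.length - (q + s + 1)) (by omega) (q + s + 1) rfl (by omega), e2]
      exact congrArg (· :: _) e1
    · rw [pk_stop s _ q (by simp only [List.length_append]; omega),
          pk_stop s _ (q - g.length) (by omega)]

lemma pk_append (s : Nat) (g r : List Char) : ∀ q,
    pk s (g ++ r) q = pk s g q ++ pk s r (q + (s + 1) * (pk s g q).length - g.length) := by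
  intro q
  induction hq : g.length - q using Nat.strong_induction_on generalizing q with
  | _ d ih =>
    by_cases h : q < g.length
    · rw [pk, dif_pos (by simp only [List.length_append]; omega)]
      conv_rhs => rw [pk, dif_pos h]
      have e1 : (g ++ r)[q]'(by simp only [List.length_append]; omega) = g[q]'h := by
        rw [List.getElem_append_left h]
      rw [e1, ih (g.length - (q + s + 1)) (by omega) (q + s + 1) rfl]
      simp only [List.length_cons, List.cons_append]
      have e2 : q + s + 1 + (s + 1) * (pk s g (q + s + 1)).length
          = q + (s + 1) * ((pk s g (q + s + 1)).length + 1) := by ring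
      rw [show q + s + 1 + (s + 1) * (pk s g (q + s + 1)).length - g.length
            = q + (s + 1) * ((pk s g (q + s + 1)).length + 1) - g.length from by rw [e2]]
    · rw [pk_stop s g q (by omega), pk_append_ge s g r q (by omega)]
      simp only [List.length_nil, List.nil_append]
      rw [show q + (s + 1) * 0 - g.length = q - g.length from by omega]

lemma pick_aux (s : Nat) (g : List Char) : ∀ qN : Nat,
    List.filterMap (fun k : Nat => g[(((qN : Nat) : Int) + (((s : Nat) : Int) + 1) * (k : Int)).toNat]?)
      (List.range ((((g.length : Int) - (qN : Int) + (s : Int)) / ((s : Int) + 1)).toNat))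
    = pk s g qN := by
  intro qN
  induction hq : g.length - qN using Nat.strong_induction_on generalizing qN with
  | _ d ih =>
    by_cases h : qN < g.length
    · have hnum : (g.length : Int) - qN + s = ((g.length : Int) - (qN + s + 1 : Nat) + s) + 1 * ((s : Int) + 1) := by
        push_cast; ring
      have hcnt : (((g.length : Int) - qN + s) / ((s : Int) + 1)).toNat
          = ((((g.length : Int) - ((qN + s + 1 : Nat) : Int) + s) / ((s : Int) + 1)).toNat) + 1 := by
        rw [hnum, Int.add_mul_ediv_right _ _ (by omega : ((s : Int) + 1) ≠ 0)]
        by_cases hc : qN + s + 1 ≤ g.length + s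
        · have h0 : (0 : Int) ≤ (g.length : Int) - ((qN + s + 1 : Nat) : Int) + s := by push_cast; omega
          have := Int.ediv_nonneg h0 (by omega : (0:Int) ≤ (s : Int) + 1)
          omega
        · have h0 : (g.length : Int) - ((qN + s + 1 : Nat) : Int) + s < 0 := by push_cast; omega
          have := Int.ediv_neg_of_neg_of_pos h0 (by omega : (0:Int) < (s : Int) + 1)
          omega
      rw [hcnt, List.range_succ_eq_map, List.filterMap_cons, List.filterMap_map]
      have hf0 : g[(((qN : Nat) : Int) + (((s : Nat) : Int) + 1) * ((0 : Nat) : Int)).toNat]? = some (g[qN]'h) := by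
        have : (((qN : Nat) : Int) + (((s : Nat) : Int) + 1) * ((0 : Nat) : Int)).toNat = qN := by push_cast; omega
        rw [this, List.getElem?_eq_getElem h]
      rw [hf0]
      have hfun : ((fun k : Nat => g[(((qN : Nat) : Int) + (((s : Nat) : Int) + 1) * (k : Int)).toNat]?) ∘ Nat.succ)
          = (fun k : Nat => g[((((qN + s + 1 : Nat) : Nat) : Int) + (((s : Nat) : Int) + 1) * (k : Int)).toNat]?) := by
        funext k
        simp only [Function.comp]
        congr 2
        push_cast
        ring
      rw [hfun, ih (g.length - (qN + s + 1)) (by omega) (qN + s + 1) rfl]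
      conv_rhs => rw [pk, dif_pos h]
    · have hc0 : (((g.length : Int) - qN + s) / ((s : Int) + 1)).toNat = 0 := by
        by_cases hc : qN ≤ g.length + s
        · have h0 : (0 : Int) ≤ (g.length : Int) - qN + s := by omega
          have := Int.ediv_eq_zero_of_lt h0 (by omega : (g.length : Int) - qN + s < (s : Int) + 1)
          omega
        · have h0 : (g.length : Int) - qN + s < 0 := by omega
          have := Int.ediv_neg_of_neg_of_pos h0 (by omega : (0:Int) < (s : Int) + 1)
          omega
      rw [hc0, pk_stop s g qN (by omega)]
      rfl

lemma slice_eq_pk (s : Nat) (g : List Char) (qN : Nat) :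
    (PySem.List.slice? g (some ((qN : Nat) : Int)) none ((s : Int) + 1)).getD [] = pk s g qN := by
  have h1 : ¬ ((s : Int) + 1 < 0) := by omega
  have h2 : (0 : Int) < (s : Int) + 1 := by omega
  have h3 : ¬ (((qN : Nat) : Int) < 0) := by omega
  have h4 : ¬ ((s : Int) + 1 = 0) := by omega
  simp only [PySem.List.slice?, PySem.List.sliceIndices, if_neg h1, if_pos h2, if_neg h3,
    if_neg h4, Option.getD_some]
  by_cases h5 : qN < g.length
  · rw [min_eq_left (by exact_mod_cast Nat.le_of_lt h5),
        if_pos (by exact_mod_cast h5)]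
    have e1 : (g.length : Int) - ↑qN + (↑s + 1) - 1 = (g.length : Int) - ↑qN + ↑s := by ring
    rw [e1]
    exact pick_aux s g qN
  · rw [min_eq_right (by exact_mod_cast Nat.le_of_not_lt h5), if_neg (by omega)]
    rw [pk_stop s g qN (by omega)]
    rfl

lemma altInner_full (m t : Int) (f : Nat) (need endPos pos : Int) (r out : List Char)
    (h : ¬ (out.length : Int) < t) :
    altInner m t f need endPos pos r out = (out, need) := by
  cases f <;> simp [altInner, h]

lemma altInner_spec (s : Nat) (m t : Int) (hm : m = (s : Int) + 1) (ht : 0 ≤ t) (r : List Char) :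
    ∀ f (J P : Nat) (out : List Char), r.length ≤ f + J →
      ∃ need', altInner m t f ((P : Int) + (J : Int)) ((P : Int) + (r.length : Int)) (P : Int) r out
          = (out ++ (pk s r J).take (t.toNat - out.length), need')
        ∧ ((out.length : Int) + ((pk s r J).length : Int) ≤ t →
            need' = (P : Int) + (J : Int) + m * (pk s r J).length) := by
  intro f
  induction f with
  | zero =>
    intro J P out hf
    refine ⟨(P : Int) + (J : Int), ?_, ?_⟩
    · rw [altInner, pk_stop s r J (by omega)]
      simp
    · intro _
      rw [pk_stop s r J (by omega)]
      simp
  | succ f ih =>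
    intro J P out hf
    by_cases hJ : J < r.length
    · by_cases hout : (out.length : Int) < t
      · -- loop body runs
        rw [altInner, if_pos ⟨by push_cast; omega, hout⟩]
        have hget : PySem.List.pyGet? r ((P : Int) + (J : Int) - (P : Int)) = some (r[J]'hJ) := by
          rw [show (P : Int) + (J : Int) - (P : Int) = ((J : Nat) : Int) from by ring]
          rw [PySem.List.pyGet?_natCast, List.getElem?_eq_getElem hJ]
        rw [hget]
        have hne : (P : Int) + (J : Int) + m = (P : Int) + ((J + s + 1 : Nat) : Int) := by
          rw [hm]; push_cast; ring
        rw [hne]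
        obtain ⟨need', heq, hsync⟩ := ih (J + s + 1) P (out ++ [r[J]'hJ]) (by omega)
        refine ⟨need', ?_, ?_⟩
        · rw [heq]
          conv_rhs => rw [pk, dif_pos hJ]
          have htk : t.toNat - out.length = (t.toNat - (out ++ [r[J]'hJ]).length) + 1 := by
            simp only [List.length_append, List.length_cons, List.length_nil]
            omega
          rw [htk, List.take_succ_cons]
          simp
        · intro hroom
          rw [pk, dif_pos hJ] at hroom
          simp only [List.length_cons] at hroom
          have := hsync (by simp only [List.length_append, List.length_cons, List.length_nil]; push_cast at hroom ⊢; omega)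
          rw [this]
          conv_rhs => rw [pk, dif_pos hJ]
          simp only [List.length_cons]
          rw [hm]
          push_cast
          ring
      · -- out is full: nothing happens
        rw [altInner_full m t (f + 1) _ _ _ r out hout]
        refine ⟨(P : Int) + (J : Int), ?_, ?_⟩
        · have : t.toNat - out.length = 0 := by omega
          rw [this]
          simp
        · intro hroom
          have hlen : 1 ≤ (pk s r J).length := by
            rw [pk, dif_pos hJ]; simp
          omega
    · -- J past the block
      refine ⟨(P : Int) + (J : Int), ?_, ?_⟩
      · rw [altInner, if_neg (by push_cast; omega), pk_stop s r J (by omega)]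
        simp
      · intro _
        rw [pk_stop s r J (by omega)]
        simp

lemma main_loop (n t m p : Int) (s nn : Nat) (hn : 2 ≤ nn) (hnn : n = (nn : Int))
    (hm : m = (s : Int) + 1) (hp : 1 ≤ p) :
    ∀ f (k : Nat) (game out : List Char) (need : Int),
      out = (pk s game (p - 1).toNat).take t.toNat →
      ((pk s game (p - 1).toNat).length < t.toNat →
        need = (p - 1) + m * (pk s game (p - 1).toNat).length) →
      altOuter n t m f out need (game.length : Int) (k : Int) =
        (pk s (gameLoop n t m f game (k : Int)) (p - 1).toNat).take t.toNat := by
  subst hnn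
  intro f
  induction f with
  | zero => intro k game out need h1 h2; rw [altOuter, gameLoop]; exact h1
  | succ f ih =>
    intro k game out need h1 h2
    rw [altOuter, gameLoop]
    by_cases hcond : (game.length : Int) ≤ t * m
    · rw [if_pos hcond, if_pos hcond]
      dsimp only
      have ht : 0 ≤ t := by
        by_contra hneg
        have h0 : t < 0 := by omega
        have hmul := mul_neg_of_neg_of_pos h0 (show (0 : Int) < m by omega)
        have h00 : (0 : Int) ≤ (game.length : Int) := by positivity
        omega
      rw [← blk_eq nn hn k]
      set r := numbifyA (nn : Int) (k : Int) with hr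
      set q0 := (p - 1).toNat with hq0
      have hpq : (p : Int) - 1 = (q0 : Int) := by omega
      set cnt := (pk s game q0).length with hcnt
      have hkk : ((k : Int) + 1) = ((k + 1 : Nat) : Int) := by push_cast; ring
      have hend : (game.length : Int) + (r.length : Int) = ((game ++ r).length : Int) := by
        simp
      by_cases hfull : cnt < t.toNat
      · -- still collecting
        have hout : out = pk s game q0 := by
          rw [h1, List.take_of_length_le (by omega)]
        have holen : out.length = cnt := by rw [hout]
        set C := (s + 1) * cnt with hC
        have hCc : ((C : Nat) : Int) = ((s : Int) + 1) * (cnt : Int) := by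
          rw [hC]; push_cast; ring
        have hJge : game.length ≤ q0 + C := pk_next s game q0
        set J := q0 + C - game.length with hJ
        have hneed : need = (game.length : Int) + (J : Int) := by
          rw [h2 hfull, hpq, hm, ← hCc]
          omega
        obtain ⟨need1, heq, hsync⟩ :=
          altInner_spec s m t hm ht r (r.length + t.toNat + 1) J game.length out (by omega)
        rw [hneed, heq]
        have hPk : pk s (game ++ r) q0 = pk s game q0 ++ pk s r J := by
          rw [pk_append s game r q0, ← hcnt, ← hC, ← hJ]
        have harg1 : out ++ (pk s r J).take (t.toNat - out.length)
            = (pk s (game ++ r) q0).take t.toNat := by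
          rw [hPk, List.take_append,
              List.take_of_length_le (show (pk s game q0).length ≤ t.toNat by omega), hout]
        have harg2 : (pk s (game ++ r) q0).length < t.toNat →
            need1 = (p - 1) + m * (pk s (game ++ r) q0).length := by
          intro hlt
          rw [hPk, List.length_append] at hlt ⊢
          have hroom : (out.length : Int) + ((pk s r J).length : Int) ≤ t := by
            rw [holen]
            push_cast
            omega
          rw [hsync hroom, hpq]
          have hgj : (game.length : Int) + (J : Int) = (q0 : Int) + m * (cnt : Int) := by
            rw [hm, ← hCc]
            omega
          rw [hgj, hm]
          push_cast
          ring
        rw [hend, hkk]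
        exact ih (k + 1) (game ++ r) _ _ harg1 harg2
      · -- output already complete
        have holen : out.length = t.toNat := by
          rw [h1, List.length_take]
          omega
        have hfullI : ¬ ((out.length : Int) < t) := by
          rw [holen]
          omega
        rw [altInner_full m t (r.length + t.toNat + 1) _ _ _ r out hfullI]
        have hPk : pk s (game ++ r) q0 = pk s game q0 ++ pk s r (q0 + (s + 1) * cnt - game.length) := by
          rw [pk_append s game r q0, ← hcnt]
        have harg1 : out = (pk s (game ++ r) q0).take t.toNat := by
          rw [hPk, List.take_append_of_le_length (by omega), h1]
        have harg2 : (pk s (game ++ r) q0).length < t.toNat →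
            need = (p - 1) + m * (pk s (game ++ r) q0).length := by
          intro hlt
          rw [hPk, List.length_append] at hlt
          omega
        rw [hend, hkk]
        exact ih (k + 1) (game ++ r) _ _ harg1 harg2
    · rw [if_neg hcond, if_neg hcond]
      exact h1

lemma slice?_nil (a b : Option Int) (st : Int) :
    (PySem.List.slice? ([] : List Char) a b st).getD [] = [] := by
  simp only [PySem.List.slice?, PySem.List.sliceIndices]
  split_ifs <;> simp

lemma solution_eq : ∀ (n t m p : Int), Pre_solution n t m p → solution n t m p = solution_alt n t m p := by
  intro n t m p hpre
  rcases hpre with hpre | htm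
  case inr =>
    have hF : (t * m).toNat + 2 = 2 := by omega
    unfold solution solution_alt
    dsimp only
    rw [hF]
    rw [show gameLoop n t m 2 [] 0 = [] from by rw [gameLoop, if_neg (by simp; omega)]]
    rw [show altOuter n t m 2 [] (p - 1) 0 0 = [] from by rw [altOuter, if_neg (by omega)]]
    rw [slice?_nil]
    simp [PySem.List.slice]
  obtain ⟨hn2, hm1, hp1⟩ := hpre
  obtain ⟨nn, hnn, hn⟩ : ∃ nn : Nat, n = (nn : Int) ∧ 2 ≤ nn := ⟨n.toNat, by omega, by omega⟩
  obtain ⟨s, hm⟩ : ∃ s : Nat, m = (s : Int) + 1 := ⟨(m - 1).toNat, by omega⟩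
  set q0 := (p - 1).toNat with hq0d
  have hpq : p - 1 = (q0 : Int) := by omega
  unfold solution solution_alt
  dsimp only
  by_cases ht : 0 ≤ t
  · have hmain := main_loop n t m p s nn hn hnn hm hp1 ((t * m).toNat + 2) 0 [] [] (p - 1)
      (by rw [pk_stop s [] q0 (by simp)]; simp)
      (by intro _; rw [pk_stop s [] q0 (by simp)]; simp)
    simp only [List.length_nil, Nat.cast_zero] at hmain
    rw [hpq, hm, slice_eq_pk s _ q0, PySem.List.slice_to _ ht, ← hm, ← hpq, ← hmain]
  · have htm : t * m < 0 := mul_neg_of_neg_of_pos (by omega) (by omega)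
    have hF : (t * m).toNat + 2 = 2 := by omega
    rw [hF]
    rw [show gameLoop n t m 2 [] 0 = [] from by rw [gameLoop, if_neg (by simp; omega)]]
    rw [show altOuter n t m 2 [] (p - 1) 0 0 = [] from by rw [altOuter, if_neg (by omega)]]
    rw [hpq, hm, slice_eq_pk s _ q0, pk_stop s [] q0 (by simp)]
    simp [PySem.List.slice]

-- ===== VERDICT (by name: the statement is the Claim_ definition above) =====
theorem solution_spec : Claim_equal_solution := by
  unfold Claim_equal_solution Spec_solution
  intro n t m p _ hpre
  exact solution_eq n t m p hpre
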